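-- pv_equiv track=rewrite | github.com/dayanithaa/study-tutor | part_1/app.py | _determine_concept_type
-- ===== SOURCE A (Python) =====
-- def _determine_concept_type(concept: str, context: str) -> str:
--     """Determine the type of concept based on content and context"""
--     concept_lower = concept.lower()
--
--     # High-level topics
--     topic_indicators = ['introduction', 'overview', 'chapter', 'part', 'section']
--     if any(indicator in concept_lower for indicator in topic_indicators):
--         return 'topic'
--
--     # Theoretical concepts
--     theory_indicators = ['theorem', 'principle', 'law', 'theory', 'model']
--     if any(indicator in concept_lower for indicator in theory_indicators):
--         return 'theory'
--
--     # Practical methods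
--     method_indicators = ['algorithm', 'method', 'technique', 'approach', 'procedure']
--     if any(indicator in concept_lower for indicator in method_indicators):
--         return 'method'
--
--     # Mathematical concepts
--     math_indicators = ['equation', 'formula', 'function', 'variable', 'constant']
--     if any(indicator in concept_lower for indicator in math_indicators):
--         return 'mathematical'
--
--     # Default to concept
--     return 'concept'
-- ===== SOURCE B (Python) =====
-- _KEYWORD_RANK = {
--     'introduction': 0, 'overview': 0, 'chapter': 0, 'part': 0, 'section': 0,
--     'theorem': 1, 'principle': 1, 'law': 1, 'theory': 1, 'model': 1,
--     'algorithm': 2, 'method': 2, 'technique': 2, 'approach': 2, 'procedure': 2,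
--     'equation': 3, 'formula': 3, 'function': 3, 'variable': 3, 'constant': 3,
-- }
-- _CATEGORIES = ['topic', 'theory', 'method', 'mathematical']
--
--
-- def _determine_concept_type(concept: str, context: str) -> str:
--     """Classify by scanning ALL keywords once, keeping the best (lowest) rank."""
--     cl = concept.lower()
--     best = None
--     for kw, rank in _KEYWORD_RANK.items():
--         if kw in cl and (best is None or rank < best):
--             best = rank
--     return 'concept' if best is None else _CATEGORIES[best]
-- ===== Notes on version B (the rewrite author's own statement) =====
-- stated objective: alternative
-- what changed: Instead of four any()-guarded early returns, B scans a flat keyword->rank map once with no early exit, accumulating the minimum matching rank, and finally indexes a category list (priority = min rank instead of first-branch-wins).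
import Mathlib
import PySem

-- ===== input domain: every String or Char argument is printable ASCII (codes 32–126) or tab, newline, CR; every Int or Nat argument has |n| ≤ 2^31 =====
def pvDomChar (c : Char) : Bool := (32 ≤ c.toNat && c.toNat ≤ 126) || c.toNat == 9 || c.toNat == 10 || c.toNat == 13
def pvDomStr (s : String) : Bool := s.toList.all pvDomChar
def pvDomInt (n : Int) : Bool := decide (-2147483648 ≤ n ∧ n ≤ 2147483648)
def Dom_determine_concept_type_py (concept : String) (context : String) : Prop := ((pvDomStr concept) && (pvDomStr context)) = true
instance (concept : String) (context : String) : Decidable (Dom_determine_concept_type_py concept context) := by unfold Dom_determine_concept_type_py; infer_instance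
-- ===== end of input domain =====

-- B replaces A's four any()-guarded early returns by one full scan of a flat
-- keyword->rank map keeping the minimum matching rank; same result, same cost.

-- ===== PORT A =====
def determine_concept_type_py (concept : String) (context : String) : String :=
  let concept_lower := (PySem.Str.lower concept).toList
  let topic_indicators := ["introduction", "overview", "chapter", "part", "section"]
  if topic_indicators.any (fun ind => PySem.Chars.isIn ind.toList concept_lower) then "topic"
  else
    let theory_indicators := ["theorem", "principle", "law", "theory", "model"]
    if theory_indicators.any (fun ind => PySem.Chars.isIn ind.toList concept_lower) then "theory"
    else
      let method_indicators := ["algorithm", "method", "technique", "approach", "procedure"]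
      if method_indicators.any (fun ind => PySem.Chars.isIn ind.toList concept_lower) then "method"
      else
        let math_indicators := ["equation", "formula", "function", "variable", "constant"]
        if math_indicators.any (fun ind => PySem.Chars.isIn ind.toList concept_lower) then "mathematical"
        else "concept"

-- ===== PORT B =====
-- the flat keyword -> rank map of Source B (dict literal, insertion order)
def pvKeywordRank : List (String × Nat) :=
  [("introduction", 0), ("overview", 0), ("chapter", 0), ("part", 0), ("section", 0),
   ("theorem", 1), ("principle", 1), ("law", 1), ("theory", 1), ("model", 1),
   ("algorithm", 2), ("method", 2), ("technique", 2), ("approach", 2), ("procedure", 2),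
   ("equation", 3), ("formula", 3), ("function", 3), ("variable", 3), ("constant", 3)]

def pvCategories : List String := ["topic", "theory", "method", "mathematical"]

-- Source B's loop body: update `best` when kw matches and its rank improves on best
def pvStep (cl : List Char) (best : Option Nat) (p : String × Nat) : Option Nat :=
  if PySem.Chars.isIn p.1.toList cl &&
     (match best with | none => true | some b => decide (p.2 < b)) then some p.2 else best

def determine_concept_type_py_alt (concept : String) (context : String) : String :=
  let cl := (PySem.Str.lower concept).toList
  let best := pvKeywordRank.foldl (pvStep cl) none
  match best with
  | none => "concept"
  | some b => pvCategories.getD b "concept"   -- _CATEGORIES[best]; best is always < 4 here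

-- ===== PRECONDITION & SPEC =====
def Spec_determine_concept_type_py (concept : String) (context : String) (out : String) : Prop := out = determine_concept_type_py_alt concept context
instance (concept : String) (context : String) (out : String) : Decidable (Spec_determine_concept_type_py concept context out) := by unfold Spec_determine_concept_type_py; infer_instance

-- ===== CLAIM (what is proved, stated in full; the proofs are below) =====
def Claim_equal_determine_concept_type_py : Prop := ∀ (concept : String) (context : String), Dom_determine_concept_type_py concept context → Spec_determine_concept_type_py concept context (determine_concept_type_py concept context)

-- ===== LEMMAS AND PROOFS =====

-- folding a constant-rank group from `some b` with b ≤ r never changes best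
theorem pv_fold_group_stay (cl : List Char) (kws : List String) (r b : Nat) (h : b ≤ r) :
    (kws.map (fun k => (k, r))).foldl (pvStep cl) (some b) = some b := by
  induction kws with
  | nil => rfl
  | cons k rest ih =>
    simp only [List.map, List.foldl, pvStep]
    have : ¬ (r < b) := Nat.not_lt.mpr h
    simp [this, ih]

-- folding a constant-rank group from `none` yields `some r` iff some keyword matches
theorem pv_fold_group_none (cl : List Char) (kws : List String) (r : Nat) :
    (kws.map (fun k => (k, r))).foldl (pvStep cl) none =
      (if kws.any (fun k => PySem.Chars.isIn k.toList cl) then some r else none) := by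
  induction kws with
  | nil => rfl
  | cons k rest ih =>
    simp only [List.map, List.foldl, pvStep, List.any_cons]
    by_cases hk : PySem.Chars.isIn k.toList cl
    · simp [hk, pv_fold_group_stay cl rest r r (Nat.le_refl r)]
    · simp [hk, ih]

-- the flat keyword map is the concatenation of the four constant-rank groups
theorem pv_keywords_grouped : pvKeywordRank =
    (["introduction", "overview", "chapter", "part", "section"].map (fun k => (k, 0)))
    ++ (["theorem", "principle", "law", "theory", "model"].map (fun k => (k, 1)))
    ++ (["algorithm", "method", "technique", "approach", "procedure"].map (fun k => (k, 2)))
    ++ (["equation", "formula", "function", "variable", "constant"].map (fun k => (k, 3))) := rfl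

-- ===== VERDICT (by name: the statement is the Claim_ definition above) =====
theorem determine_concept_type_py_spec : Claim_equal_determine_concept_type_py := by
  intro concept context _
  show determine_concept_type_py concept context = determine_concept_type_py_alt concept context
  simp only [determine_concept_type_py, determine_concept_type_py_alt]
  set cl := (PySem.Str.lower concept).toList with hcl
  rw [pv_keywords_grouped, List.foldl_append, List.foldl_append, List.foldl_append,
      pv_fold_group_none]
  by_cases h0 : (["introduction", "overview", "chapter", "part", "section"].any
      (fun k => PySem.Chars.isIn k.toList cl)) = true
  · rw [if_pos h0, if_pos h0, pv_fold_group_stay cl _ 1 0 (by omega),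
        pv_fold_group_stay cl _ 2 0 (by omega), pv_fold_group_stay cl _ 3 0 (by omega)]
    rfl
  · rw [if_neg h0, if_neg h0, pv_fold_group_none]
    by_cases h1 : (["theorem", "principle", "law", "theory", "model"].any
        (fun k => PySem.Chars.isIn k.toList cl)) = true
    · rw [if_pos h1, if_pos h1, pv_fold_group_stay cl _ 2 1 (by omega),
          pv_fold_group_stay cl _ 3 1 (by omega)]
      rfl
    · rw [if_neg h1, if_neg h1, pv_fold_group_none]
      by_cases h2 : (["algorithm", "method", "technique", "approach", "procedure"].any
          (fun k => PySem.Chars.isIn k.toList cl)) = true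
      · rw [if_pos h2, if_pos h2, pv_fold_group_stay cl _ 3 2 (by omega)]
        rfl
      · rw [if_neg h2, if_neg h2, pv_fold_group_none]
        by_cases h3 : (["equation", "formula", "function", "variable", "constant"].any
            (fun k => PySem.Chars.isIn k.toList cl)) = true
        · rw [if_pos h3, if_pos h3]
          rfl
        · rw [if_neg h3, if_neg h3]
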